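-- pv_equiv track=rewrite | github.com/siacavazzi/amogus | server/assets/task_list_manager.py | _extract_locations
-- ===== SOURCE A (Python) =====
-- def _extract_locations(tasks):
--     """Preserve location order while ensuring Other is available."""
--     locations = []
--     for task in tasks:
--         location = task.get("location", "Other")
--         if location not in locations:
--             locations.append(location)
--
--     if "Other" not in locations:
--         locations.append("Other")
--
--     return locations
-- ===== SOURCE B (Python) =====
-- def _extract_locations(tasks):
--     """Preserve location order while ensuring Other is available.
--
--     Builds the result back-to-front: starting from ["Other"], each earlier
--     task's location is prepended and any later duplicate of it (including a
--     later "Other") is filtered out, so first occurrences win without any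
--     membership test against an accumulated seen-list.
--     """
--     out = ["Other"]
--     for task in reversed(tasks):
--         loc = task.get("location", "Other")
--         out = [loc] + [y for y in out if y != loc]
--     return out
-- ===== Notes on version B (the rewrite author's own statement) =====
-- stated objective: alternative
-- what changed: Instead of a forward loop that tests each location against the growing result list and finally appends 'Other' if missing, B builds the result back-to-front: starting from ['Other'] it walks the tasks in reverse, prepending each location and filtering out its later duplicates, so no seen-list membership test and no final 'Other' check exist.
import Mathlib
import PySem

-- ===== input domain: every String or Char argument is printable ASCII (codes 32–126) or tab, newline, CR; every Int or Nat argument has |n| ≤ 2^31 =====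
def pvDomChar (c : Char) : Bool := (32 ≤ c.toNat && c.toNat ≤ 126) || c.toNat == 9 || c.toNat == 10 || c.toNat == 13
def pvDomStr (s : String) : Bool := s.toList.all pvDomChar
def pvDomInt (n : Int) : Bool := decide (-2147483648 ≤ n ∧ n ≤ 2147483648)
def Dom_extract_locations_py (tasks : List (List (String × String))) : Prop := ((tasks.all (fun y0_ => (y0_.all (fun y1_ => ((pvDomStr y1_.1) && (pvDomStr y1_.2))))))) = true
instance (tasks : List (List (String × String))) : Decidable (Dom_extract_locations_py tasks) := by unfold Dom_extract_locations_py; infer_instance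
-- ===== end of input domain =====

-- ===== PORT A =====
-- A: forward loop appending each unseen location, then append "Other" if absent.
def extract_locations_py (tasks : List (List (String × String))) : List String :=
  let locations := tasks.foldl
    (fun locations task =>
      let location := PySem.Dict.getD ⟨task⟩ "location" "Other"
      if locations.contains location then locations else locations ++ [location]) []
  if locations.contains "Other" then locations else locations ++ ["Other"]

-- ===== PORT B =====
-- B: back-to-front — start from ["Other"], walk tasks in reverse, prepend each
-- location and filter out its later duplicates.
def extract_locations_py_alt (tasks : List (List (String × String))) : List String :=
  tasks.reverse.foldl
    (fun out task =>
      let loc := PySem.Dict.getD ⟨task⟩ "location" "Other"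
      loc :: out.filter (fun y => !(y == loc))) ["Other"]

-- ===== PRECONDITION & SPEC =====
def Spec_extract_locations_py (tasks : List (List (String × String))) (out : List String) : Prop := out = extract_locations_py_alt tasks
instance (tasks : List (List (String × String))) (out : List String) : Decidable (Spec_extract_locations_py tasks out) := by unfold Spec_extract_locations_py; infer_instance

-- ===== CLAIM (what is proved, stated in full; the proofs are below) =====
def Claim_equal_extract_locations_py : Prop := ∀ (tasks : List (List (String × String))), Dom_extract_locations_py tasks → Spec_extract_locations_py tasks (extract_locations_py tasks)

-- ===== LEMMAS AND PROOFS =====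

-- an order-preserving set, consed in front of a filtered set, is the set of the cons
theorem pv_ofList_cons_filter (x : String) (l : List String) :
    PySem.Set.ofList (x :: l) = x :: (PySem.Set.ofList l).filter (fun y => !(y == x)) := by
  rw [PySem.Set.ofList_cons]
  simp [PySem.Set.discard]

-- the back-to-front fold of B computes the ordered set of (xs ++ b)
theorem pv_foldr_filter {α : Type} (g : α → String) (xs : List α) (b : List String)
    (hb : PySem.Set.ofList b = b) :
    xs.foldr (fun t out => g t :: out.filter (fun y => !(y == g t))) b
      = PySem.Set.ofList (xs.map g ++ b) := by
  induction xs with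
  | nil => simp [hb]
  | cons x xs ih =>
      simp only [List.foldr_cons, ih, List.map_cons, List.cons_append]
      rw [pv_ofList_cons_filter]

-- ===== VERDICT (by name: the statement is the Claim_ definition above) =====
theorem extract_locations_py_spec : Claim_equal_extract_locations_py := by
  intro tasks _
  unfold Spec_extract_locations_py extract_locations_py extract_locations_py_alt
  rw [List.foldl_reverse,
      pv_foldr_filter (fun task => PySem.Dict.getD ⟨task⟩ "location" "Other") tasks ["Other"] rfl,
      PySem.Set.ofList_append_singleton, PySem.Set.ofList, PySem.Set.add, List.foldl_map]
  rfl
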